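-- pv_equiv track=rewrite | github.com/netotz/codecamp | vjudge/club_hispano/m_enero24_2023/c_cash.py | count_keystrokes
-- ===== SOURCE A (Python) =====
-- def count_keystrokes(target: str):
--     total = len(target)
--
--     i = 1
--     # O(n)
--     while i < len(target):
--         if target[i] == "0" and target[i - 1] == "0":
--             total -= 1
--             i += 1
--
--         i += 1
--
--     return total
-- ===== SOURCE B (Python) =====
-- import re
--
-- def count_keystrokes(target: str):
--     return len(target) - sum(len(run) // 2 for run in re.findall("0+", target))
-- ===== Notes on version B (the rewrite author's own statement) =====
-- stated objective: idiomatic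
-- what changed: Replaces the index-walking skip loop with a regex collecting the maximal runs of the zero character and subtracts floor(run_length/2) per run in closed form.
import Mathlib
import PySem

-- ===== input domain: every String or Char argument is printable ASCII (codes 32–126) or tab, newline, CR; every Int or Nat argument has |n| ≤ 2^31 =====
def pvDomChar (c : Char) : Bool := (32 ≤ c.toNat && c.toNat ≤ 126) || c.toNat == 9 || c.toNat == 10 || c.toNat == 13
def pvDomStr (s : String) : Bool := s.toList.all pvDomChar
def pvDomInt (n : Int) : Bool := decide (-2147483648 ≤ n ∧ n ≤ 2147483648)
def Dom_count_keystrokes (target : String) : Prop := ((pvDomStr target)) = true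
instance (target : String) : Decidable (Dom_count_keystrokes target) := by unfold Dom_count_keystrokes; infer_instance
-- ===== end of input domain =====

-- B replaces A's index-walking skip loop by collecting the maximal runs of '0'
-- and subtracting floor(len(run)/2) per run (idiomatic; same return value).

-- ===== PORT A =====
-- the while loop of A: state (total, i), i walks forward by 1, or by 2 after a matched "00" pair
def pvLoopA (s : List Char) (total : Int) (i : Nat) : Int :=
  if i < s.length then
    if s.getD i ' ' = '0' ∧ s.getD (i - 1) ' ' = '0' then
      pvLoopA s (total - 1) (i + 2)
    else
      pvLoopA s total (i + 1)
  else total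
termination_by s.length - i

def count_keystrokes (target : String) : Int :=
  pvLoopA target.toList (target.toList.length : Int) 1

-- ===== PORT B =====
-- port of re.findall("0+", target): the lengths of the maximal runs of '0', left to right
def pvZeroRuns (s : List Char) (cur : Nat) : List Nat :=
  match s with
  | [] => if cur > 0 then [cur] else []
  | c :: rest =>
    if c = '0' then pvZeroRuns rest (cur + 1)
    else if cur > 0 then cur :: pvZeroRuns rest 0 else pvZeroRuns rest 0

def count_keystrokes_alt (target : String) : Int :=
  (target.toList.length : Int) - (((pvZeroRuns target.toList 0).map (· / 2)).sum : Nat)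

-- ===== PRECONDITION & SPEC =====
def Spec_count_keystrokes (target : String) (out : Int) : Prop := out = count_keystrokes_alt target
instance (target : String) (out : Int) : Decidable (Spec_count_keystrokes target out) := by unfold Spec_count_keystrokes; infer_instance

-- ===== CLAIM (what is proved, stated in full; the proofs are below) =====
def Claim_equal_count_keystrokes : Prop := ∀ (target : String), Dom_count_keystrokes target → Spec_count_keystrokes target (count_keystrokes target)

-- ===== LEMMAS AND PROOFS =====

-- number of non-overlapping "00" pairs collapsed, scanning left to right (A's effect on total)
def pvPairs : List Char → Nat
  | a :: b :: t => if a = '0' ∧ b = '0' then 1 + pvPairs t else pvPairs (b :: t)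
  | _ => 0

-- same, single-pass with a pending-unmatched-zero flag (bridge to B's run view)
def pvPairs' (s : List Char) (p : Bool) : Nat :=
  match s with
  | [] => 0
  | c :: rest =>
    if c = '0' then (if p then 1 + pvPairs' rest false else pvPairs' rest true)
    else pvPairs' rest false

theorem pvPairs_eq_pairs' : ∀ s : List Char, pvPairs s = pvPairs' s false
  | [] => by simp [pvPairs, pvPairs']
  | [a] => by
      by_cases h : a = '0' <;> simp [pvPairs, pvPairs', h]
  | a :: b :: t => by
      have ih1 := pvPairs_eq_pairs' t
      have ih2 := pvPairs_eq_pairs' (b :: t)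
      by_cases ha : a = '0'
      · by_cases hb : b = '0'
        · simp [pvPairs, pvPairs', ha, hb, ih1]
        · simp [pvPairs, pvPairs', ha, hb] at *
          simpa [pvPairs', hb] using ih2
      · simp [pvPairs, pvPairs', ha, ih2]

theorem pvZeroRuns_sum (s : List Char) : ∀ cur : Nat,
    ((pvZeroRuns s cur).map (· / 2)).sum = cur / 2 + pvPairs' s (cur % 2 = 1) := by
  induction s with
  | nil => intro cur; by_cases h : cur > 0 <;> simp [pvZeroRuns, pvPairs', h]; omega
  | cons c rest ih =>
    intro cur
    by_cases hc : c = '0'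
    · have := ih (cur + 1)
      simp only [pvZeroRuns, hc, if_true, this, pvPairs']
      rcases Nat.even_or_odd cur with he | ho
      · have h2 : cur % 2 = 0 := Nat.even_iff.mp he
        have h3 : (cur + 1) % 2 = 1 := by omega
        simp [h2, h3]
        omega
      · have h2 : cur % 2 = 1 := Nat.odd_iff.mp ho
        have h3 : (cur + 1) % 2 = 0 := by omega
        simp [h2, h3]
        omega
    · by_cases hp : cur > 0
      · simp [pvZeroRuns, hc, hp, pvPairs', ih 0]
      · have : cur = 0 := by omega
        subst this
        simp [pvZeroRuns, hc, pvPairs', ih 0]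

theorem pvLoopA_drop (s : List Char) : ∀ (j : Nat) (total : Int),
    pvLoopA s total (j + 1) = total - pvPairs (s.drop j) := by
  have H : ∀ n, ∀ j, s.length - j ≤ n → ∀ total : Int,
      pvLoopA s total (j + 1) = total - pvPairs (s.drop j) := by
    intro n
    induction n with
    | zero =>
      intro j hj total
      have hlen : s.length ≤ j := by omega
      have hdrop : s.drop j = [] := List.drop_eq_nil_of_le hlen
      rw [pvLoopA]
      have : ¬ (j + 1 < s.length) := by omega
      simp [this, hdrop, pvPairs]
    | succ n ih =>
      intro j hj total
      rw [pvLoopA]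
      by_cases h : j + 1 < s.length
      · have hj' : j < s.length := by omega
        have hd : s.drop j = s[j] :: s.drop (j + 1) :=
          List.drop_eq_getElem_cons hj'
        have hd2 : s.drop (j + 1) = s[j+1] :: s.drop (j + 2) :=
          List.drop_eq_getElem_cons h
        have g1 : s.getD (j + 1) ' ' = s[j+1] := by
          simp [List.getD_eq_getElem?_getD, List.getElem?_eq_getElem h]
        have g0 : s.getD (j + 1 - 1) ' ' = s[j] := by
          simp [List.getD_eq_getElem?_getD, List.getElem?_eq_getElem hj']
        by_cases hz : s[j+1] = '0' ∧ s[j] = '0'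
        · simp only [h, g0, g1, hz, and_self, if_pos]
          rw [show j + 1 + 2 = (j + 2) + 1 by omega]
          rw [ih (j + 2) (by omega) (total - 1)]
          rw [hd, hd2]
          simp only [pvPairs, hz.1, hz.2, and_self, if_true]
          push_cast
          ring
        · simp only [h, if_true, g0, g1]
          rw [if_neg (by tauto)]
          rw [ih (j + 1) (by omega) total]
          rw [hd]
          have hp : pvPairs (s[j] :: List.drop (j + 1) s) = pvPairs (List.drop (j + 1) s) := by
            rw [hd2]
            simp only [pvPairs]
            rw [if_neg (by tauto)]
          rw [hp]
      · have hdrop : pvPairs (s.drop j) = 0 := by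
          rcases Nat.lt_or_ge j s.length with hj2 | hj2
          · have : s.drop j = s[j] :: s.drop (j + 1) := List.drop_eq_getElem_cons hj2
            have : s.drop (j+1) = [] := List.drop_eq_nil_of_le (by omega)
            rw [List.drop_eq_getElem_cons hj2, this]
            simp [pvPairs]
          · rw [List.drop_eq_nil_of_le hj2]; simp [pvPairs]
        simp [h, hdrop]
  intro j total
  exact H (s.length - j) j le_rfl total

-- ===== VERDICT (by name: the statement is the Claim_ definition above) =====
theorem count_keystrokes_spec : Claim_equal_count_keystrokes := by
  intro target _
  unfold Spec_count_keystrokes count_keystrokes count_keystrokes_alt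
  have h1 := pvLoopA_drop target.toList 0 (target.toList.length : Int)
  simp only [List.drop_zero] at h1
  rw [h1, pvPairs_eq_pairs']
  have h2 := pvZeroRuns_sum target.toList 0
  simp at h2
  rw [h2]
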